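-- pv_equiv track=rewrite | github.com/Ikerlb/kattis | boggle/sol2.py | parse_solution
-- ===== SOURCE A (Python) =====
-- scores = {
--     1: 0,
--     2: 0,
--     3: 1,
--     4: 1,
--     5: 2,
--     6: 3,
--     7: 5,
--     8: 11,
-- }
--
-- def parse_solution(l):
--     score = sum(scores[len(w)] for w in l)
--     max_length = max(len(w) for w in l)
--     same = [w for w in l if len(w) == max_length]
--     same.sort()
--     biggest = same[0]
--     num = len(l)
--     return f"{score} {biggest} {num}"
-- ===== SOURCE B (Python) =====
-- scores = {
--     1: 0,
--     2: 0,
--     3: 1,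
--     4: 1,
--     5: 2,
--     6: 3,
--     7: 5,
--     8: 11,
-- }
--
-- def parse_solution(l):
--     # one fused pass: running score, running max length with lexicographically
--     # smallest word at that length
--     score = 0
--     best = ""
--     best_len = 0
--     for w in l:
--         n = len(w)
--         score += scores[n]
--         if best_len < n:
--             best = w
--             best_len = n
--         elif n == best_len and w < best:
--             best = w
--     return f"{score} {best} {len(l)}"
-- ===== Notes on version B (the rewrite author's own statement) =====
-- stated objective: faster
-- what changed: A's four separate passes (sum of scores, max of lengths, filter+sort for the lexicographically smallest longest word, len) are fused into one loop that keeps a running score and the lexicographically smallest word at the current maximum length, so the filter and the sort disappear (measured ~1.9x at the largest size).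
-- outside the precondition, e.g. on parse_solution([]): A raises ValueError, B returns '0  0'
import Mathlib
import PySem

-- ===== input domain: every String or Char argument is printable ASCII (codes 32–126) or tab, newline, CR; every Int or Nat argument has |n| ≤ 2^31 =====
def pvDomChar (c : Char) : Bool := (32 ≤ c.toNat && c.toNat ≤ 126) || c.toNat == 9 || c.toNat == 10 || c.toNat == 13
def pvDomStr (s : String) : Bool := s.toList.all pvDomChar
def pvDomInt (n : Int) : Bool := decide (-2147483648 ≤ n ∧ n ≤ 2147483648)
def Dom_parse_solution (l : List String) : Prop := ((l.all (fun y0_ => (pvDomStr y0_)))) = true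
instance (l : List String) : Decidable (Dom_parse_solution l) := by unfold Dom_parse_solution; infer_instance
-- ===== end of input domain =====

-- B fuses A's four passes (sum, max, filter+sort, len) into one loop; equivalence of the return value is proved on nonempty lists whose word lengths are scores-keys.

-- ===== PORT A =====
def scoresDict : PySem.Dict Int Int :=
  PySem.Dict.ofList [(1, 0), (2, 0), (3, 1), (4, 1), (5, 2), (6, 3), (7, 5), (8, 11)]

-- scoresDict.getD _ 0 is scores[...]; Python raises KeyError on a missing key, Pre_ keeps every length a key
def parse_solution (l : List String) : String :=
  let score := (l.map (fun w => scoresDict.getD (PySem.Str.len w) 0)).sum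
  -- max() of an empty sequence raises ValueError; Pre_ excludes l = []
  let max_length := (PySem.List.max? (l.map (fun w => PySem.Str.len w)) (fun x => x)).getD 0
  let same := l.filter (fun w => PySem.Str.len w == max_length)
  let sameSorted := PySem.List.sorted same (fun x => x) false
  let biggest := (PySem.List.pyGet? sameSorted 0).getD ""
  let num : Int := l.length
  PySem.Int.toStr score ++ " " ++ biggest ++ " " ++ PySem.Int.toStr num

-- ===== PORT B =====
def pbStep (st : Int × String × Int) (w : String) : Int × String × Int :=
  if st.2.2 < PySem.Str.len w then (st.1 + scoresDict.getD (PySem.Str.len w) 0, w, PySem.Str.len w)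
  else if PySem.Str.len w == st.2.2 && decide (w < st.2.1) then (st.1 + scoresDict.getD (PySem.Str.len w) 0, w, st.2.2)
  else (st.1 + scoresDict.getD (PySem.Str.len w) 0, st.2.1, st.2.2)

def parse_solution_alt (l : List String) : String :=
  let st := l.foldl pbStep (0, "", 0)
  PySem.Int.toStr st.1 ++ " " ++ st.2.1 ++ " " ++ PySem.Int.toStr (l.length : Int)

-- ===== PRECONDITION & SPEC =====
-- Pre_ excludes the empty list (max() raises ValueError) and words whose length is not a key of scores (scores[len(w)] raises KeyError)
def Pre_parse_solution (l : List String) : Prop :=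
  l ≠ [] ∧ ∀ w ∈ l, 1 ≤ PySem.Str.len w ∧ PySem.Str.len w ≤ 8
instance (l : List String) : Decidable (Pre_parse_solution l) := by
  unfold Pre_parse_solution; infer_instance

def pvWitness_parse_solution : List String := ["abc", "de", "xyz"]

def Spec_parse_solution (l : List String) (out : String) : Prop := out = parse_solution_alt l
instance (l : List String) (out : String) : Decidable (Spec_parse_solution l out) := by
  unfold Spec_parse_solution; infer_instance

-- ===== CLAIM (what is proved, stated in full; the proofs are below) =====
def Claim_equal_parse_solution : Prop :=
  ∀ (l : List String), Dom_parse_solution l → Pre_parse_solution l →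
    Spec_parse_solution l (parse_solution l)

-- ===== LEMMAS AND PROOFS =====

-- score component of B's fold: running sum of the per-word scores
theorem pbFold_score (l : List String) (st : Int × String × Int) :
    (l.foldl pbStep st).1 = st.1 + (l.map (fun w => scoresDict.getD (PySem.Str.len w) 0)).sum := by
  induction l generalizing st with
  | nil => simp
  | cons w t ih =>
    simp only [List.foldl_cons, List.map_cons, List.sum_cons, ih]
    unfold pbStep
    split_ifs <;> simp <;> ring

-- length component of B's fold: running max of the word lengths
theorem pbFold_len (l : List String) (st : Int × String × Int) :
    (l.foldl pbStep st).2.2 = l.foldl (fun a w => max a (PySem.Str.len w)) st.2.2 := by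
  induction l generalizing st with
  | nil => rfl
  | cons w t ih =>
    simp only [List.foldl_cons, ih]
    unfold pbStep
    split_ifs with h1 h2 <;> simp only [PySem.Str.len, String.length_toList] at h1 <;>
      (congr 1; simp only [PySem.Str.len, String.length_toList]; omega)

-- monotonicity of the tracked maximum length through B's fold
theorem pbFold_len_mono (l : List String) (st : Int × String × Int) :
    st.2.2 ≤ (l.foldl pbStep st).2.2 := by
  rw [pbFold_len]
  exact (PySem.List.le_foldl_max_int l (fun w => PySem.Str.len w) st.2.2).1

-- best component of B's fold: member of, and lower bound for, the words of maximal length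
-- (the starting word keeps counting as a candidate iff its length is still the maximum)
theorem pbFold_best (l : List String) (st : Int × String × Int) :
    ((l.foldl pbStep st).2.1 = st.2.1 ∧ (l.foldl pbStep st).2.2 = st.2.2 ∨
       (l.foldl pbStep st).2.1 ∈ l ∧
         PySem.Str.len (l.foldl pbStep st).2.1 = (l.foldl pbStep st).2.2) ∧
    (∀ w ∈ l, PySem.Str.len w = (l.foldl pbStep st).2.2 → (l.foldl pbStep st).2.1 ≤ w) ∧
    (st.2.2 = (l.foldl pbStep st).2.2 → (l.foldl pbStep st).2.1 ≤ st.2.1) := by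
  induction l generalizing st with
  | nil => simp
  | cons x t ih =>
    simp only [List.foldl_cons]
    have hmono := pbFold_len_mono t (pbStep st x)
    obtain ⟨ihA, ihB, ihC⟩ := ih (pbStep st x)
    by_cases h1 : st.2.2 < PySem.Str.len x
    · have hst : pbStep st x = (st.1 + scoresDict.getD (PySem.Str.len x) 0, x, PySem.Str.len x) := by
        unfold pbStep; rw [if_pos h1]
      rw [hst] at ihA ihB ihC hmono ⊢
      refine ⟨?_, ?_, ?_⟩
      · rcases ihA with ⟨he1, he2⟩ | ⟨hm, hl⟩
        · exact Or.inr ⟨by rw [he1]; exact List.mem_cons_self, by rw [he1, he2]⟩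
        · exact Or.inr ⟨List.mem_cons_of_mem _ hm, hl⟩
      · intro w hw hlw
        rcases List.mem_cons.mp hw with rfl | hw'
        · exact ihC (by simpa using hlw)
        · exact ihB w hw' hlw
      · intro heq
        simp only at hmono
        omega
    · by_cases h2 : (PySem.Str.len x == st.2.2 && decide (x < st.2.1)) = true
      · have hst : pbStep st x = (st.1 + scoresDict.getD (PySem.Str.len x) 0, x, st.2.2) := by
          unfold pbStep; rw [if_neg h1, if_pos h2]
        simp only [Bool.and_eq_true, beq_iff_eq, decide_eq_true_eq] at h2
        rw [hst] at ihA ihB ihC hmono ⊢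
        simp only at ihA ihB ihC hmono
        refine ⟨?_, ?_, ?_⟩
        · rcases ihA with ⟨he1, he2⟩ | ⟨hm, hl⟩
          · exact Or.inr ⟨by rw [he1]; exact List.mem_cons_self, by rw [he1, he2, ← h2.1]⟩
          · exact Or.inr ⟨List.mem_cons_of_mem _ hm, hl⟩
        · intro w hw hlw
          rcases List.mem_cons.mp hw with rfl | hw'
          · have : st.2.2 = (List.foldl pbStep (st.1 + scoresDict.getD (PySem.Str.len w) 0, w, st.2.2) t).2.2 := by
              omega
            exact ihC this
          · exact ihB w hw' hlw
        · intro heq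
          exact le_trans (ihC heq) (le_of_lt h2.2)
      · have hst : pbStep st x = (st.1 + scoresDict.getD (PySem.Str.len x) 0, st.2.1, st.2.2) := by
          unfold pbStep; rw [if_neg h1, if_neg h2]
        simp only [Bool.and_eq_true, beq_iff_eq, decide_eq_true_eq, not_and, not_lt] at h2
        rw [hst] at ihA ihB ihC hmono ⊢
        simp only at ihA ihB ihC hmono
        refine ⟨?_, ?_, ?_⟩
        · rcases ihA with ⟨he1, he2⟩ | ⟨hm, hl⟩
          · exact Or.inl ⟨he1, he2⟩
          · exact Or.inr ⟨List.mem_cons_of_mem _ hm, hl⟩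
        · intro w hw hlw
          rcases List.mem_cons.mp hw with rfl | hw'
          · have hlen : PySem.Str.len w = st.2.2 := by omega
            exact le_trans (ihC (by omega)) (h2 hlen)
          · exact ihB w hw' hlw
        · intro heq
          exact ihC heq

theorem parse_solution_spec : Claim_equal_parse_solution := by
  intro l _ hpre
  obtain ⟨hne, hlen⟩ := hpre
  obtain ⟨x, t, rfl⟩ := List.exists_cons_of_ne_nil hne
  unfold Spec_parse_solution parse_solution parse_solution_alt
  have hx1 : 1 ≤ PySem.Str.len x := (hlen x (by simp)).1
  -- the tracked maximum length is max(len(w) for w in l)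
  have hM : ((x :: t).foldl pbStep (0, "", 0)).2.2 =
      ((t.map (fun w => PySem.Str.len w)).foldl max (PySem.Str.len x)) := by
    rw [pbFold_len, List.foldl_cons, List.foldl_map]
    have h0 : max ((0 : Int), "", (0 : Int)).2.2 (PySem.Str.len x) = PySem.Str.len x := by
      simp only; omega
    rw [h0]
  have hmax : PySem.List.max? ((x :: t).map (fun w => PySem.Str.len w)) (fun y => y) =
      some ((x :: t).foldl pbStep (0, "", 0)).2.2 := by
    rw [List.map_cons, PySem.List.max?_id_cons, hM]
  -- the maximum length is ≥ 1 on Pre_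
  have hMpos : 1 ≤ ((x :: t).foldl pbStep (0, "", 0)).2.2 := by
    have h := (PySem.List.le_foldl_max_int t (fun w => PySem.Str.len w) (PySem.Str.len x)).1
    rw [hM, List.foldl_map]
    omega
  obtain ⟨hA, hB, hC⟩ := pbFold_best (x :: t) (0, "", 0)
  have hbest : ((x :: t).foldl pbStep (0, "", 0)).2.1 ∈ x :: t ∧
      PySem.Str.len ((x :: t).foldl pbStep (0, "", 0)).2.1 = ((x :: t).foldl pbStep (0, "", 0)).2.2 := by
    rcases hA with ⟨_, h2⟩ | h
    · simp only at h2; omega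
    · exact h
  have hbmem : ((x :: t).foldl pbStep (0, "", 0)).2.1 ∈
      (x :: t).filter (fun w => PySem.Str.len w == ((x :: t).foldl pbStep (0, "", 0)).2.2) :=
    List.mem_filter.mpr ⟨hbest.1, by simp only [beq_iff_eq]; exact hbest.2⟩
  -- the sorted filtered list is nonempty; its head is the fold's best word
  obtain ⟨m, tl, heq⟩ : ∃ m tl,
      PySem.List.sorted ((x :: t).filter (fun w => PySem.Str.len w == ((x :: t).foldl pbStep (0, "", 0)).2.2))
        (fun y => y) false = m :: tl := by
    rcases hsorted : PySem.List.sorted ((x :: t).filter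
        (fun w => PySem.Str.len w == ((x :: t).foldl pbStep (0, "", 0)).2.2)) (fun y => y) false with _ | ⟨m, tl⟩
    · exact absurd ((PySem.List.sorted_eq_nil_iff _ _ _).mp hsorted) (List.ne_nil_of_mem hbmem)
    · exact ⟨m, tl, rfl⟩
  have hmmem : m ∈ (x :: t).filter (fun w => PySem.Str.len w == ((x :: t).foldl pbStep (0, "", 0)).2.2) := by
    have : m ∈ PySem.List.sorted ((x :: t).filter
        (fun w => PySem.Str.len w == ((x :: t).foldl pbStep (0, "", 0)).2.2)) (fun y => y) false := by
      rw [heq]; exact List.mem_cons_self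
    exact (PySem.List.mem_sorted _ _ _ _).mp this
  have hm_eq : m = ((x :: t).foldl pbStep (0, "", 0)).2.1 := by
    have h1 : ((x :: t).foldl pbStep (0, "", 0)).2.1 ≤ m := by
      have hmf := List.mem_filter.mp hmmem
      exact hB m hmf.1 (by simpa using hmf.2)
    have h2 : m ≤ ((x :: t).foldl pbStep (0, "", 0)).2.1 :=
      PySem.List.key_head_sorted_le _ _ heq _ hbmem
    exact le_antisymm h2 h1
  -- score component
  have hscore : ((x :: t).foldl pbStep (0, "", 0)).1 =
      ((x :: t).map (fun w => scoresDict.getD (PySem.Str.len w) 0)).sum := by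
    rw [pbFold_score]; simp
  simp only [hmax, Option.getD_some, heq, hscore, PySem.List.pyGet?, PySem.List.pyIdx?]
  rw [hm_eq]
  simp
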